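-- pv_equiv track=rewrite | github.com/XIIITrading/Epoch_v3 | 12_base_tool/02_zone_system/15_bt_journal/entry_impact/analyzer.py | _calculate_alignments
-- ===== SOURCE A (Python) =====
-- from typing import Dict, List, Optional, Tuple
--
-- def _calculate_alignments(trade: Dict) -> Dict[str, Dict]:
--     """
--     Calculate alignment status for each factor based on trade direction.
--
--     Returns dict: factor_name -> {'aligned': bool, 'neutral': bool}
--     """
--     direction = (trade.get('direction') or '').upper()
--     is_long = direction == 'LONG'
--
--     alignments = {}
--
--     # Structure factors: BULL aligned for LONG, BEAR aligned for SHORT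
--     for tf in ['m5_structure', 'm15_structure', 'h1_structure', 'h4_structure']:
--         value = (trade.get(tf) or '').upper()
--         if value == 'NEUTRAL' or value == '':
--             alignments[tf] = {'aligned': False, 'neutral': True}
--         elif is_long:
--             alignments[tf] = {'aligned': value == 'BULL', 'neutral': False}
--         else:  # SHORT
--             alignments[tf] = {'aligned': value == 'BEAR', 'neutral': False}
--
--     # VWAP: ABOVE aligned for LONG, BELOW aligned for SHORT
--     vwap = (trade.get('entry_vs_vwap') or '').upper()
--     if vwap == 'AT' or vwap == '':
--         alignments['vwap'] = {'aligned': False, 'neutral': True}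
--     elif is_long:
--         alignments['vwap'] = {'aligned': vwap == 'ABOVE', 'neutral': False}
--     else:
--         alignments['vwap'] = {'aligned': vwap == 'BELOW', 'neutral': False}
--
--     # SMA Stack: BULLISH aligned for LONG, BEARISH aligned for SHORT
--     sma = (trade.get('sma9_vs_sma21') or '').upper()
--     if sma == '':
--         alignments['sma_stack'] = {'aligned': False, 'neutral': True}
--     elif is_long:
--         alignments['sma_stack'] = {'aligned': sma == 'BULLISH', 'neutral': False}
--     else:
--         alignments['sma_stack'] = {'aligned': sma == 'BEARISH', 'neutral': False}
--
--     # Volume Trend: INCREASING or FLAT is aligned for both directions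
--     vol = (trade.get('volume_trend') or '').upper()
--     if vol == '':
--         alignments['volume'] = {'aligned': False, 'neutral': True}
--     else:
--         alignments['volume'] = {'aligned': vol in ['INCREASING', 'FLAT'], 'neutral': False}
--
--     # Volume Delta: BULL aligned for LONG, BEAR aligned for SHORT
--     vol_delta = (trade.get('volume_delta_class') or '').upper()
--     if vol_delta == 'NEUTRAL' or vol_delta == '':
--         alignments['volume_delta'] = {'aligned': False, 'neutral': True}
--     elif is_long:
--         alignments['volume_delta'] = {'aligned': vol_delta == 'BULL', 'neutral': False}
--     else:
--         alignments['volume_delta'] = {'aligned': vol_delta == 'BEAR', 'neutral': False}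
--
--     return alignments
-- ===== SOURCE B (Python) =====
-- _ANTONYM = {'BULL': 'BEAR', 'BEAR': 'BULL', 'ABOVE': 'BELOW', 'BELOW': 'ABOVE',
--             'BULLISH': 'BEARISH', 'BEARISH': 'BULLISH'}
--
-- _FACTORS = [
--     ('m5_structure',  'm5_structure',       ('NEUTRAL',), ('BULL',)),
--     ('m15_structure', 'm15_structure',      ('NEUTRAL',), ('BULL',)),
--     ('h1_structure',  'h1_structure',       ('NEUTRAL',), ('BULL',)),
--     ('h4_structure',  'h4_structure',       ('NEUTRAL',), ('BULL',)),
--     ('vwap',          'entry_vs_vwap',      ('AT',),      ('ABOVE',)),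
--     ('sma_stack',     'sma9_vs_sma21',      (),           ('BULLISH',)),
--     ('volume',        'volume_trend',       (),           ('INCREASING', 'FLAT')),
--     ('volume_delta',  'volume_delta_class', ('NEUTRAL',), ('BULL',)),
-- ]
--
--
-- def _calculate_alignments(trade):
--     """Reduce SHORT to LONG: flip the value through an antonym involution once,
--     then alignment is a single direction-free membership test per factor."""
--     flip = (trade.get('direction') or '').upper() != 'LONG'
--
--     def status(key, neutral, long_aligned):
--         v = (trade.get(key) or '').upper()
--         if v == '' or v in neutral:
--             return {'aligned': False, 'neutral': True}
--         if flip: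
--             v = _ANTONYM.get(v, v)
--         return {'aligned': v in long_aligned, 'neutral': False}
--
--     return {name: status(key, neutral, ok) for name, key, neutral, ok in _FACTORS}
-- ===== Notes on version B (the rewrite author's own statement) =====
-- stated objective: alternative
-- what changed: Instead of branching on direction inside every factor, B normalizes the value once through an antonym involution (BULL<->BEAR, ABOVE<->BELOW, BULLISH<->BEARISH) when the trade is not LONG, so each factor becomes a single direction-free membership test against its LONG-aligned set, driven by one factor list.
import Mathlib
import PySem

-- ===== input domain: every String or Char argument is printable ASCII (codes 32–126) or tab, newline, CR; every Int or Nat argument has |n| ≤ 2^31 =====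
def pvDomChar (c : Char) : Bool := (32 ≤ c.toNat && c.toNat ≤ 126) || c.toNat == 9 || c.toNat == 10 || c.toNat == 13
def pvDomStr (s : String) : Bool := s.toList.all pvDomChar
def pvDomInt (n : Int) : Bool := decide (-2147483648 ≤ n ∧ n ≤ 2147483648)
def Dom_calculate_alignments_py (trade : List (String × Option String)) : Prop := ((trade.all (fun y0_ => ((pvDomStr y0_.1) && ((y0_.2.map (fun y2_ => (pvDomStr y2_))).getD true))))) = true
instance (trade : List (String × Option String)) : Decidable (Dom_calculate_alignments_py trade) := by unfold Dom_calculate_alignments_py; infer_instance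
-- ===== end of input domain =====

-- B reduces SHORT to LONG by flipping the value through an antonym involution once, so each factor
-- is a single direction-free membership test; same values as A's six direction-branching blocks.

-- shared helper: (trade.get(k) or '').upper()
def pvGetUp (trade : List (String × Option String)) (k : String) : String :=
  PySem.Str.upper (match (PySem.Dict.mk trade).get? k with
    | some (some s) => s
    | _ => "")

-- ===== PORT A =====
def calculate_alignments_py (trade : List (String × Option String)) : List (String × List (String × Bool)) :=
  let direction := pvGetUp trade "direction"
  let is_long := direction == "LONG"
  let alignments : PySem.Dict String (List (String × Bool)) := PySem.Dict.empty
  let alignments := ["m5_structure", "m15_structure", "h1_structure", "h4_structure"].foldl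
    (fun alignments tf =>
      let value := pvGetUp trade tf
      if value == "NEUTRAL" || value == "" then
        alignments.insert tf [("aligned", false), ("neutral", true)]
      else if is_long then
        alignments.insert tf [("aligned", value == "BULL"), ("neutral", false)]
      else
        alignments.insert tf [("aligned", value == "BEAR"), ("neutral", false)]) alignments
  let vwap := pvGetUp trade "entry_vs_vwap"
  let alignments :=
    if vwap == "AT" || vwap == "" then
      alignments.insert "vwap" [("aligned", false), ("neutral", true)]
    else if is_long then
      alignments.insert "vwap" [("aligned", vwap == "ABOVE"), ("neutral", false)]
    else
      alignments.insert "vwap" [("aligned", vwap == "BELOW"), ("neutral", false)]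
  let sma := pvGetUp trade "sma9_vs_sma21"
  let alignments :=
    if sma == "" then
      alignments.insert "sma_stack" [("aligned", false), ("neutral", true)]
    else if is_long then
      alignments.insert "sma_stack" [("aligned", sma == "BULLISH"), ("neutral", false)]
    else
      alignments.insert "sma_stack" [("aligned", sma == "BEARISH"), ("neutral", false)]
  let vol := pvGetUp trade "volume_trend"
  let alignments :=
    if vol == "" then
      alignments.insert "volume" [("aligned", false), ("neutral", true)]
    else
      alignments.insert "volume" [("aligned", ["INCREASING", "FLAT"].contains vol), ("neutral", false)]
  let vol_delta := pvGetUp trade "volume_delta_class"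
  let alignments :=
    if vol_delta == "NEUTRAL" || vol_delta == "" then
      alignments.insert "volume_delta" [("aligned", false), ("neutral", true)]
    else if is_long then
      alignments.insert "volume_delta" [("aligned", vol_delta == "BULL"), ("neutral", false)]
    else
      alignments.insert "volume_delta" [("aligned", vol_delta == "BEAR"), ("neutral", false)]
  alignments.items

-- ===== PORT B =====
def pvAntonym : PySem.Dict String String :=
  PySem.Dict.mk [("BULL", "BEAR"), ("BEAR", "BULL"), ("ABOVE", "BELOW"), ("BELOW", "ABOVE"),
                 ("BULLISH", "BEARISH"), ("BEARISH", "BULLISH")]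

def pvFactors : List (String × String × List String × List String) :=
  [ ("m5_structure",  "m5_structure",       ["NEUTRAL"], ["BULL"]),
    ("m15_structure", "m15_structure",      ["NEUTRAL"], ["BULL"]),
    ("h1_structure",  "h1_structure",       ["NEUTRAL"], ["BULL"]),
    ("h4_structure",  "h4_structure",       ["NEUTRAL"], ["BULL"]),
    ("vwap",          "entry_vs_vwap",      ["AT"],      ["ABOVE"]),
    ("sma_stack",     "sma9_vs_sma21",      [],          ["BULLISH"]),
    ("volume",        "volume_trend",       [],          ["INCREASING", "FLAT"]),
    ("volume_delta",  "volume_delta_class", ["NEUTRAL"], ["BULL"]) ]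

-- the inner `status` of Source B
def pvStatus (trade : List (String × Option String)) (flip : Bool)
    (key : String) (neutral long_aligned : List String) : List (String × Bool) :=
  let v := pvGetUp trade key
  if v == "" || neutral.contains v then
    [("aligned", false), ("neutral", true)]
  else
    let v := if flip then pvAntonym.getD v v else v
    [("aligned", long_aligned.contains v), ("neutral", false)]

def calculate_alignments_py_alt (trade : List (String × Option String)) : List (String × List (String × Bool)) :=
  let flip := !(pvGetUp trade "direction" == "LONG")
  -- dict comprehension over pvFactors (distinct names): build the dict in order, return its items
  (pvFactors.foldl (fun (out : PySem.Dict String (List (String × Bool))) row =>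
      out.insert row.1 (pvStatus trade flip row.2.1 row.2.2.1 row.2.2.2)) PySem.Dict.empty).items

-- ===== PRECONDITION & SPEC =====
def Spec_calculate_alignments_py (trade : List (String × Option String)) (out : List (String × List (String × Bool))) : Prop := out = calculate_alignments_py_alt trade
instance (trade : List (String × Option String)) (out : List (String × List (String × Bool))) : Decidable (Spec_calculate_alignments_py trade out) := by unfold Spec_calculate_alignments_py; infer_instance

-- ===== CLAIM (what is proved, stated in full; the proofs are below) =====
def Claim_equal_calculate_alignments_py : Prop := ∀ (trade : List (String × Option String)), Dom_calculate_alignments_py trade → Spec_calculate_alignments_py trade (calculate_alignments_py trade)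

-- ===== LEMMAS AND PROOFS =====

-- evaluate the antonym lookup on a symbolic string
theorem anton_eval (v : String) :
    pvAntonym.getD v v =
      if v = "BULL" then "BEAR" else if v = "BEAR" then "BULL"
      else if v = "ABOVE" then "BELOW" else if v = "BELOW" then "ABOVE"
      else if v = "BULLISH" then "BEARISH" else if v = "BEARISH" then "BULLISH" else v := by
  simp only [pvAntonym, PySem.Dict.getD, PySem.Dict.get?, List.find?]
  split_ifs with h1 h2 h3 h4 h5 h6
  · subst h1; rfl
  · subst h2; rfl
  · subst h3; rfl
  · subst h4; rfl
  · subst h5; rfl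
  · subst h6; rfl
  · rw [beq_eq_false_iff_ne.mpr (Ne.symm h1), beq_eq_false_iff_ne.mpr (Ne.symm h2),
        beq_eq_false_iff_ne.mpr (Ne.symm h3), beq_eq_false_iff_ne.mpr (Ne.symm h4),
        beq_eq_false_iff_ne.mpr (Ne.symm h5), beq_eq_false_iff_ne.mpr (Ne.symm h6)]
    rfl

-- one branch block of A equals one table entry of B (BULL/BEAR shape)
theorem stepStruct (trade : List (String × Option String))
    (d : PySem.Dict String (List (String × Bool))) (name tf : String) (is_long : Bool) :
    (if pvGetUp trade tf == "NEUTRAL" || pvGetUp trade tf == "" then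
       d.insert name [("aligned", false), ("neutral", true)]
     else if is_long then d.insert name [("aligned", pvGetUp trade tf == "BULL"), ("neutral", false)]
     else d.insert name [("aligned", pvGetUp trade tf == "BEAR"), ("neutral", false)])
    = d.insert name (pvStatus trade (!is_long) tf ["NEUTRAL"] ["BULL"]) := by
  simp only [pvStatus]
  generalize pvGetUp trade tf = v
  rw [anton_eval]
  by_cases h1 : v = "" <;> by_cases h2 : v = "NEUTRAL" <;> cases is_long <;>
    simp_all [beq_eq_decide] <;> (try split_ifs) <;> simp_all

theorem stepVwap (trade : List (String × Option String))
    (d : PySem.Dict String (List (String × Bool))) (is_long : Bool) :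
    (if pvGetUp trade "entry_vs_vwap" == "AT" || pvGetUp trade "entry_vs_vwap" == "" then
       d.insert "vwap" [("aligned", false), ("neutral", true)]
     else if is_long then
       d.insert "vwap" [("aligned", pvGetUp trade "entry_vs_vwap" == "ABOVE"), ("neutral", false)]
     else d.insert "vwap" [("aligned", pvGetUp trade "entry_vs_vwap" == "BELOW"), ("neutral", false)])
    = d.insert "vwap" (pvStatus trade (!is_long) "entry_vs_vwap" ["AT"] ["ABOVE"]) := by
  simp only [pvStatus]
  generalize pvGetUp trade "entry_vs_vwap" = v
  rw [anton_eval]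
  by_cases h1 : v = "" <;> by_cases h2 : v = "AT" <;> cases is_long <;>
    simp_all [beq_eq_decide] <;> (try split_ifs) <;> simp_all

theorem stepSma (trade : List (String × Option String))
    (d : PySem.Dict String (List (String × Bool))) (is_long : Bool) :
    (if pvGetUp trade "sma9_vs_sma21" == "" then
       d.insert "sma_stack" [("aligned", false), ("neutral", true)]
     else if is_long then
       d.insert "sma_stack" [("aligned", pvGetUp trade "sma9_vs_sma21" == "BULLISH"), ("neutral", false)]
     else d.insert "sma_stack" [("aligned", pvGetUp trade "sma9_vs_sma21" == "BEARISH"), ("neutral", false)])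
    = d.insert "sma_stack" (pvStatus trade (!is_long) "sma9_vs_sma21" [] ["BULLISH"]) := by
  simp only [pvStatus]
  generalize pvGetUp trade "sma9_vs_sma21" = v
  rw [anton_eval]
  by_cases h1 : v = "" <;> cases is_long <;>
    simp_all [beq_eq_decide] <;> (try split_ifs) <;> simp_all

theorem stepVol (trade : List (String × Option String))
    (d : PySem.Dict String (List (String × Bool))) (is_long : Bool) :
    (if pvGetUp trade "volume_trend" == "" then
       d.insert "volume" [("aligned", false), ("neutral", true)]
     else
       d.insert "volume"
         [("aligned", (["INCREASING", "FLAT"] : List String).contains (pvGetUp trade "volume_trend")),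
          ("neutral", false)])
    = d.insert "volume" (pvStatus trade (!is_long) "volume_trend" [] ["INCREASING", "FLAT"]) := by
  simp only [pvStatus]
  generalize pvGetUp trade "volume_trend" = v
  rw [anton_eval]
  by_cases h1 : v = "" <;> cases is_long <;>
    simp_all [beq_eq_decide] <;> (try split_ifs) <;> simp_all

theorem calc_align_eq (trade : List (String × Option String)) :
    calculate_alignments_py trade = calculate_alignments_py_alt trade := by
  simp only [calculate_alignments_py, calculate_alignments_py_alt, pvFactors, List.foldl]
  rw [stepStruct trade _ "m5_structure" "m5_structure",
      stepStruct trade _ "m15_structure" "m15_structure",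
      stepStruct trade _ "h1_structure" "h1_structure",
      stepStruct trade _ "h4_structure" "h4_structure",
      stepVwap trade, stepSma trade, stepVol trade,
      stepStruct trade _ "volume_delta" "volume_delta_class"]

-- ===== VERDICT (by name: the statement is the Claim_ definition above) =====
theorem calculate_alignments_py_spec : Claim_equal_calculate_alignments_py := by
  intro trade _
  unfold Spec_calculate_alignments_py
  exact calc_align_eq trade
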